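-- pv_equiv track=rewrite | github.com/SCARLETRAIN511/python | oop-practise/ArrayAlgorithms.py | arrayAdvanceGame
-- ===== SOURCE A (Python) =====
-- def arrayAdvanceGame(array1):
--     furthestReached = 0
--     lastidx = len(array1) - 1
--     i = 0
--     while i <= furthestReached and furthestReached <= lastidx:
--         furthestReached = max(furthestReached,array1[i] + i)
--         i += 1
--     return furthestReached >= lastidx
-- ===== SOURCE B (Python) =====
-- def arrayAdvanceGame(array1):
--     # Backward greedy: shrink the leftmost index known to reach the end.
--     target = len(array1) - 1
--     for i in range(len(array1) - 1, -1, -1):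
--         if i + array1[i] >= target:
--             target = i
--     return target <= 0
-- ===== Notes on version B (the rewrite author's own statement) =====
-- stated objective: alternative
-- what changed: Replaced A's forward while-loop that grows a furthest-reachable frontier with a backward greedy scan that shrinks the leftmost index known to reach the end (opposite traversal direction, different maintained state).
import Mathlib
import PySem

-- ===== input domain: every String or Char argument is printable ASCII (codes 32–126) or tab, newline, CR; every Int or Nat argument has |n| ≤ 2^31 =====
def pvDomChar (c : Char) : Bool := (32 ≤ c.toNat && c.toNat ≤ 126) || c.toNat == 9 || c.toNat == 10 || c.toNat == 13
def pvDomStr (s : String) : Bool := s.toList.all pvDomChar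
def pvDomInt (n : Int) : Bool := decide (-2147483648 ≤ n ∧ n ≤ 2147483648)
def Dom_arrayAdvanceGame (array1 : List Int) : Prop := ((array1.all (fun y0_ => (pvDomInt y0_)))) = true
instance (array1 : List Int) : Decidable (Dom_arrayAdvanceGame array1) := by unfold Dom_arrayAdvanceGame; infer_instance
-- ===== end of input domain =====

-- B replaces A's forward frontier-growing while-loop by a backward greedy scan
-- shrinking the leftmost index known to reach the end; objective: alternative
-- algorithm of the same cost.


-- ===== PORT A =====
-- A's while loop; the loop condition forces i < array1.length, so array1[i]
-- never raises and the `.getD 0` is exact.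
def arrayAdvanceGameLoop (array1 : List Int) (furthestReached : Int) (i : Nat) : Int :=
  if h : (i : Int) ≤ furthestReached ∧ furthestReached ≤ (array1.length : Int) - 1 then
    arrayAdvanceGameLoop array1
      (max furthestReached ((PySem.List.pyGet? array1 (i : Int)).getD 0 + (i : Int))) (i + 1)
  else furthestReached
termination_by array1.length - i
decreasing_by omega

def arrayAdvanceGame (array1 : List Int) : Bool :=
  decide (arrayAdvanceGameLoop array1 0 0 ≥ (array1.length : Int) - 1)

-- ===== PORT B =====
-- backward greedy: for i in range(len-1, -1, -1): if i + array1[i] >= target: target = i;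
-- every index drawn from the range is in bounds, so the `.getD 0` is exact.
def arrayAdvanceGame_alt (array1 : List Int) : Bool :=
  let target :=
    (PySem.List.pyRange ((array1.length : Int) - 1) (-1) (-1)).foldl
      (fun target i =>
        if i + (PySem.List.pyGet? array1 i).getD 0 ≥ target then i else target)
      ((array1.length : Int) - 1)
  decide (target ≤ 0)

-- ===== PRECONDITION & SPEC =====
def Spec_arrayAdvanceGame (array1 : List Int) (out : Bool) : Prop := out = arrayAdvanceGame_alt array1
instance (array1 : List Int) (out : Bool) : Decidable (Spec_arrayAdvanceGame array1 out) := by unfold Spec_arrayAdvanceGame; infer_instance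

-- ===== CLAIM (what is proved, stated in full; the proofs are below) =====
def Claim_equal_arrayAdvanceGame : Prop := ∀ (array1 : List Int), Dom_arrayAdvanceGame array1 → Spec_arrayAdvanceGame array1 (arrayAdvanceGame array1)

-- ===== LEMMAS AND PROOFS =====

-- jump-game reachability: from index i one may hop to any k with i < k ≤ i + a[i]
inductive PvReach (a : List Int) : Nat → Nat → Prop
  | refl (i : Nat) : PvReach a i i
  | cons {i k j : Nat} : i < k → (k : Int) ≤ (i : Int) + a.getD i 0 →
      PvReach a k j → PvReach a i j

lemma pvReach_snoc {a : List Int} {x y z : Nat} (h : PvReach a x y) (h1 : y < z)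
    (h2 : (z : Int) ≤ (y : Int) + a.getD y 0) : PvReach a x z := by
  induction h with
  | refl i => exact .cons h1 h2 (.refl z)
  | cons hlt hle _ ih => exact .cons hlt hle (ih h1 h2)

lemma pvReach_bound {a : List Int} {fR : Int}
    (H : ∀ j : Nat, (j : Int) ≤ fR → (j : Int) + a.getD j 0 ≤ fR) :
    ∀ {x y : Nat}, PvReach a x y → (x : Int) ≤ fR → (y : Int) ≤ fR := by
  intro x y h
  induction h with
  | refl => exact id
  | cons hlt hle _ ih => intro hx; exact ih (le_trans hle (by have := H _ hx; omega))

lemma pvGetD_int (a : List Int) (i : Nat) :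
    (PySem.List.pyGet? a (i : Int)).getD 0 = a.getD i 0 := by
  rw [PySem.List.pyGet?_natCast]
  simp [List.getD]

-- exit analysis of A's loop: when the condition fails, the returned value is
-- ≥ len-1 exactly when the last index is reachable (given the loop invariants)
lemma pvExit (a : List Int) (hn : 1 ≤ a.length) (fR : Int) (i : Nat)
    (h0 : 0 ≤ fR) (hi : (i : Int) ≤ fR + 1)
    (H1 : ∀ j : Nat, (j : Int) ≤ fR → j < a.length → PvReach a 0 j)
    (H3 : ∀ j : Nat, j < i → (j : Int) + a.getD j 0 ≤ fR)
    (hc : ¬ ((i : Int) ≤ fR ∧ fR ≤ (a.length : Int) - 1)) :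
    (fR ≥ (a.length : Int) - 1) ↔ PvReach a 0 (a.length - 1) := by
  by_cases hfb : fR ≤ (a.length : Int) - 1
  · have hfr : fR < (i : Int) := by
      by_contra h; push_neg at h; exact hc ⟨h, hfb⟩
    constructor
    · intro hge
      exact H1 (a.length - 1) (by omega) (by omega)
    · intro hr
      by_contra hlt
      have hb := pvReach_bound (a := a) (fR := fR)
        (fun j hj => H3 j (by omega)) hr h0
      push_cast at hb; omega
  · exact iff_of_true (by omega) (H1 (a.length - 1) (by omega) (by omega))

lemma pvLoopA_iff (a : List Int) (hn : 1 ≤ a.length) :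
    ∀ (k i : Nat) (fR : Int), a.length - i = k → 0 ≤ fR → (i : Int) ≤ fR + 1 →
    (∀ j : Nat, (j : Int) ≤ fR → j < a.length → PvReach a 0 j) →
    (∀ j : Nat, j < i → (j : Int) + a.getD j 0 ≤ fR) →
    ((arrayAdvanceGameLoop a fR i ≥ (a.length : Int) - 1) ↔ PvReach a 0 (a.length - 1)) := by
  intro k
  induction k with
  | zero =>
    intro i fR hk h0 hi H1 H3
    have hc : ¬ ((i : Int) ≤ fR ∧ fR ≤ (a.length : Int) - 1) := by omega
    rw [arrayAdvanceGameLoop, dif_neg hc]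
    exact pvExit a hn fR i h0 hi H1 H3 hc
  | succ k ih =>
    intro i fR hk h0 hi H1 H3
    by_cases hc : (i : Int) ≤ fR ∧ fR ≤ (a.length : Int) - 1
    · rw [arrayAdvanceGameLoop, dif_pos hc]
      have hilen : i < a.length := by omega
      rw [pvGetD_int]
      set fR' := max fR (a.getD i 0 + (i : Int)) with hfR'
      apply ih (i + 1) fR' (by omega)
      · exact le_trans h0 (le_max_left _ _)
      · have := le_max_left fR (a.getD i 0 + (i : Int)); omega
      · intro j hj hjlen
        by_cases hjf : (j : Int) ≤ fR
        · exact H1 j hjf hjlen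
        · push_neg at hjf
          have hjle : (j : Int) ≤ a.getD i 0 + (i : Int) := by
            have := max_le_iff.mp (le_refl fR'); omega
          exact pvReach_snoc (H1 i hc.1 hilen) (by omega) (by omega)
      · intro j hj
        by_cases hji : j < i
        · exact le_trans (H3 j hji) (le_max_left _ _)
        · have : j = i := by omega
          subst this
          have := le_max_right fR (a.getD j 0 + (j : Int)); omega
    · rw [arrayAdvanceGameLoop, dif_neg hc]
      exact pvExit a hn fR i h0 hi H1 H3 hc

-- invariant proof for B's backward fold, processing indices i-1, …, 0
lemma pvDown_iff (a : List Int) (hn : 1 ≤ a.length) :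
    ∀ (i : Nat) (t : Int), i ≤ a.length →
    min (i : Int) ((a.length : Int) - 1) ≤ t → t ≤ (a.length : Int) - 1 → 0 ≤ t →
    PvReach a t.toNat (a.length - 1) →
    (∀ j : Nat, i ≤ j → (j : Int) < t → ¬ PvReach a j (a.length - 1)) →
    (((PySem.List.pyRange ((i : Int) - 1) (-1) (-1)).foldl
        (fun target i =>
          if i + (PySem.List.pyGet? a i).getD 0 ≥ target then i else target) t ≤ 0)
      ↔ PvReach a 0 (a.length - 1)) := by
  intro i
  induction i with
  | zero =>
    intro t _ _ _ h0 hr1 hr2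
    rw [PySem.List.pyRange_neg_one_eq_nil (by norm_num)]
    simp only [List.foldl_nil]
    constructor
    · intro ht
      have : t = 0 := by omega
      rw [this] at hr1; simpa using hr1
    · intro hr
      by_contra ht
      exact hr2 0 (Nat.zero_le _) (by omega) hr
  | succ m ih =>
    intro t hlen hmin hub h0 hr1 hr2
    have hml : m < a.length := hlen
    have hstep : ((m + 1 : Nat) : Int) - 1 = (m : Int) := by push_cast; omega
    rw [hstep, PySem.List.pyRange_neg_one_cons (by omega), List.foldl_cons]
    have hmt : (m : Int) ≤ t := by omega
    have hv := pvGetD_int a m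
    by_cases hj : (m : Int) + (PySem.List.pyGet? a (m : Int)).getD 0 ≥ t
    · -- jump: target becomes m
      rw [if_pos hj]
      apply ih (m : Int) (by omega) (by omega) (by omega) (by omega)
      · have htm : ((m : Int)).toNat = m := by omega
        rw [htm]
        rcases eq_or_lt_of_le hmt with heq | hlt
        · have : t.toNat = m := by omega
          rw [this] at hr1; exact hr1
        · exact PvReach.cons (by omega) (by rw [← hv]; omega) hr1
      · intro j hjm hjlt; omega
    · -- no jump: target stays t
      rw [if_neg hj]
      apply ih t (by omega) (by omega) hub h0 hr1
      intro j hjm hjlt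
      rcases eq_or_lt_of_le hjm with heq | hlt
      · subst heq
        intro hr
        cases hr with
        | refl => omega
        | cons hlt' hle' hrest =>
          exact hr2 _ (by omega) (by rw [hv] at hj; omega) hrest
      · exact hr2 j hlt hjlt

-- ===== VERDICT (by name: the statement is the Claim_ definition above) =====
theorem arrayAdvanceGame_spec : Claim_equal_arrayAdvanceGame := by
  intro a _
  unfold Spec_arrayAdvanceGame arrayAdvanceGame arrayAdvanceGame_alt
  by_cases hn : 1 ≤ a.length
  · have hA := pvLoopA_iff a hn a.length 0 0 rfl le_rfl (by norm_num)
      (fun j hj _ => by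
        have : j = 0 := by omega
        subst this; exact PvReach.refl 0)
      (fun j hj => absurd hj (by omega))
    have hB := pvDown_iff a hn a.length ((a.length : Int) - 1) le_rfl
      (by omega) le_rfl (by omega)
      (by
        have : (((a.length : Int) - 1)).toNat = a.length - 1 := by omega
        rw [this]; exact PvReach.refl _)
      (fun j hj hjlt => absurd hjlt (by omega))
    simp only []
    exact decide_eq_decide.mpr (hA.trans hB.symm)
  · have ha : a = [] := by
      cases a with
      | nil => rfl
      | cons x xs => simp at hn
    subst ha
    rw [arrayAdvanceGameLoop]
    norm_num [PySem.List.pyRange_neg_one_eq_nil]
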